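/- CARRIED OVER by tools/port_base_units.py (renaming only) from proofs.vorbis/Vorbis/Spec/Units, GENERATED there by farm/mkstatement.py from design/units.tsv (unit `exp`) and the Specs of Vorbis/Spec/*.lean — do not edit.
   THE STATEMENT of the proof unit `exp`: the function `exp` (85 instructions) satisfies its contract,
   given the contracts of its callees. What the names mean: Vorbis/Spec/Basic.lean. The theorem to prove:
   `theorem exp_ok : ProgX.Base.Spec.exp.Statement`. -/
import ProgX.Base.Spec.Libm
namespace ProgX.Base.Spec.exp
open X86 X86.User Asan

/-- The statement of unit `exp`. -/
def Statement : Prop :=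
  ∀ (Lay : Layout) (_hLay : Lay.hi = 0x1000000) (μ : Microarch) (_hμ : UserX.MicroOK μ) (u₀ : State)
    (_hcode : HasCodeNat Lay u₀ ProgX.Base.L.exp.entry ProgX.Base.Code.code_exp.nat ProgX.Base.L.exp.size)
    (_h_two_to : ∀ (others : List Obj) (frames : List (Nat × FrameLayout)), Calls Lay μ ProgX.Base.WayInv (ProgX.Base.conv u₀) ProgX.Base.L.two_to.entry (ProgX.Base.Spec.two_to.spec others frames))
    (_h_floor : ∀ (others : List Obj) (frames : List (Nat × FrameLayout)), Calls Lay μ ProgX.Base.WayInv (ProgX.Base.conv u₀) ProgX.Base.L.floor.entry (ProgX.Base.Spec.floor.spec others frames))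
    (_h_ldexp : ∀ (others : List Obj) (frames : List (Nat × FrameLayout)), Calls Lay μ ProgX.Base.WayInv (ProgX.Base.conv u₀) ProgX.Base.L.ldexp.entry (ProgX.Base.Spec.ldexp.spec others frames)),
    ∀ (others : List Obj) (frames : List (Nat × FrameLayout)), Calls Lay μ ProgX.Base.WayInv (ProgX.Base.conv u₀) ProgX.Base.L.exp.entry (ProgX.Base.Spec.exp.spec others frames)

end ProgX.Base.Spec.exp
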